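-- pv_equiv track=rewrite | github.com/MatthijsdeGoede/InternationalTrafficPack | shared.py | replace_longest_substring
-- ===== SOURCE A (Python) =====
-- def get_characters_surrounding_substring(input_string, substring):
--     index = input_string.find(substring)
--     ancestor = input_string[index - 1] if index > 0 else ""
--     successor = input_string[index + len(substring)] if index > 0 and index + len(substring) < len(
--         input_string) else "\n"
--     return ancestor, successor
--
-- def replace_longest_substring(line, replacements, code):
--     longest_replacement = ""
--     for replacement in replacements:
--         # find the longest matching substring
--         if replacement in line and len(replacement) > len(longest_replacement):
--             longest_replacement = replacement
--     if longest_replacement: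
--         # ignore comments
--         start = "\t" if "\t" in line else ""
--         line = f"{start}{line.split('#')[0].strip()}\n"
--         prev_char, next_char = get_characters_surrounding_substring(line, longest_replacement)
--         # only replace internal names containing a .
--         if next_char == "\n" or next_char == "." and prev_char == ".":
--             # put country code after occurrence
--             line = line.replace(longest_replacement, f"{longest_replacement}.{code}")
--         elif prev_char == ".":
--             # put country code at the end of the internal name
--             line = line.replace("\n", f".{code}\n")
--     return line
-- ===== SOURCE B (Python) =====
-- def replace_longest_substring(line, replacements, code):
--     # pick candidates longest-first (stable sort keeps original order on ties),
--     # take the first that occurs in the line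
--     longest = next((r for r in sorted(replacements, key=len, reverse=True) if r in line), "")
--     if not longest:
--         return line
--     line = ("\t" if "\t" in line else "") + line.split("#")[0].strip() + "\n"
--     i = line.find(longest)
--     prev = line[i - 1] if i > 0 else ""
--     nxt = line[i + len(longest)] if i > 0 and i + len(longest) < len(line) else "\n"
--     if nxt == "\n" or (nxt == "." and prev == "."):
--         return line.replace(longest, longest + "." + code)
--     if prev == ".":
--         return line.replace("\n", "." + code + "\n")
--     return line
-- ===== Notes on version B (the rewrite author's own statement) =====
-- stated objective: alternative
-- what changed: The running-maximum scan over replacements is replaced by a stable length-descending sort followed by a first-match scan (sorted(replacements, key=len, reverse=True) + next) that stops at the first candidate occurring in the line, the surrounding-character helper is inlined and the three-way branch returns early.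
import Mathlib
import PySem

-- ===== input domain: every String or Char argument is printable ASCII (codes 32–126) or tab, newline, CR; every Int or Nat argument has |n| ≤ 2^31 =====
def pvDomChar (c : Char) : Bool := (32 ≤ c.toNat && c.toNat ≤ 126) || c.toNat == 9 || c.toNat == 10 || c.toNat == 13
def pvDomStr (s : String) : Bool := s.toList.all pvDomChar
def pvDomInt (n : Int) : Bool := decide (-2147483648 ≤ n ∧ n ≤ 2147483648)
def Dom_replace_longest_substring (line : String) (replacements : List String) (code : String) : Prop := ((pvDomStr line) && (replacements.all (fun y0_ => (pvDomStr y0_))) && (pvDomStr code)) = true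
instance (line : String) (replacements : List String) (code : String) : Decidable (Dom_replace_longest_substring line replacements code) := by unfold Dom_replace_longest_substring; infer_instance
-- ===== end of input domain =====

-- B replaces A's running-maximum scan by a stable length-descending sort followed by a
-- first-match scan, inlines the surrounding-character helper and returns early (objective: alternative).

-- ===== PORT A =====
-- Python's 1-char strings / "" / "\n" for the surrounding characters are modelled as
-- Option Char: none = "" (no ancestor), some c = the 1-char string.
def get_characters_surrounding_substring (input_string : String) (substring : String) : Option Char × Option Char :=
  let index := PySem.Str.find input_string substring
  let ancestor : Option Char := if 0 < index then PySem.Str.pyGet? input_string (index - 1) else none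
  let successor : Option Char :=
    if 0 < index ∧ index + PySem.Str.len substring < PySem.Str.len input_string then
      PySem.Str.pyGet? input_string (index + PySem.Str.len substring)
    else some '\n'
  (ancestor, successor)

def replace_longest_substring (line : String) (replacements : List String) (code : String) : String :=
  let longest_replacement := replacements.foldl
    (fun longest_replacement replacement =>
      if PySem.Str.isIn replacement line &&
          decide (PySem.Str.len longest_replacement < PySem.Str.len replacement) then
        replacement
      else longest_replacement) ""
  if longest_replacement ≠ "" then
    let start := if PySem.Str.isIn "\t" line then "\t" else ""
    let line1 := start ++ PySem.Str.strip (((PySem.Str.split? line "#").getD []).headD "") ++ "\n"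
    let pc := get_characters_surrounding_substring line1 longest_replacement
    if pc.2 = some '\n' ∨ (pc.2 = some '.' ∧ pc.1 = some '.') then
      PySem.Str.replace line1 longest_replacement (longest_replacement ++ "." ++ code)
    else if pc.1 = some '.' then
      PySem.Str.replace line1 "\n" ("." ++ code ++ "\n")
    else line1
  else line

-- ===== PORT B =====
def replace_longest_substring_alt (line : String) (replacements : List String) (code : String) : String :=
  let longest := ((PySem.List.sorted replacements (fun r => PySem.Str.len r) true).find?
      (fun r => PySem.Str.isIn r line)).getD ""
  if longest = "" then line
  else
    let line1 := (if PySem.Str.isIn "\t" line then "\t" else "") ++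
      PySem.Str.strip (((PySem.Str.split? line "#").getD []).headD "") ++ "\n"
    let i := PySem.Str.find line1 longest
    let prev : Option Char := if 0 < i then PySem.Str.pyGet? line1 (i - 1) else none
    let nxt : Option Char :=
      if 0 < i ∧ i + PySem.Str.len longest < PySem.Str.len line1 then
        PySem.Str.pyGet? line1 (i + PySem.Str.len longest)
      else some '\n'
    if nxt = some '\n' ∨ (nxt = some '.' ∧ prev = some '.') then
      PySem.Str.replace line1 longest (longest ++ "." ++ code)
    else if prev = some '.' then
      PySem.Str.replace line1 "\n" ("." ++ code ++ "\n")
    else line1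

-- ===== PRECONDITION & SPEC =====
def Spec_replace_longest_substring (line : String) (replacements : List String) (code : String) (out : String) : Prop := out = replace_longest_substring_alt line replacements code
instance (line : String) (replacements : List String) (code : String) (out : String) : Decidable (Spec_replace_longest_substring line replacements code out) := by unfold Spec_replace_longest_substring; infer_instance

-- ===== CLAIM (what is proved, stated in full; the proofs are below) =====
def Claim_equal_replace_longest_substring : Prop := ∀ (line : String) (replacements : List String) (code : String), Dom_replace_longest_substring line replacements code → Spec_replace_longest_substring line replacements code (replace_longest_substring line replacements code)

-- ===== LEMMAS AND PROOFS =====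

theorem pv_len_nonneg (s : String) : 0 ≤ PySem.Str.len s := by
  simp [PySem.Str.len_eq]

theorem pv_len_eq_zero (s : String) (h : PySem.Str.len s = 0) : s = "" := by
  rw [PySem.Str.len_eq] at h
  exact String.toList_eq_nil_iff.mp (List.eq_nil_of_length_eq_zero (by exact_mod_cast h))

-- insertion with the reverse-sort comparator preserves the length-descending order
theorem pv_insertBy_pairwise (x : String) (S : List String)
    (h : S.Pairwise (fun a b => PySem.Str.len b ≤ PySem.Str.len a)) :
    (PySem.List.insertBy (fun a b => decide (PySem.Str.len b < PySem.Str.len a)) x S).Pairwise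
      (fun a b => PySem.Str.len b ≤ PySem.Str.len a) := by
  induction S with
  | nil => simp [PySem.List.insertBy]
  | cons y ys ih =>
    rw [List.pairwise_cons] at h
    by_cases hc : PySem.Str.len y < PySem.Str.len x
    · have hd : decide (PySem.Str.len y < PySem.Str.len x) = true := decide_eq_true hc
      simp only [PySem.List.insertBy, hd, if_true]
      refine List.pairwise_cons.2 ⟨?_, List.pairwise_cons.2 ⟨h.1, h.2⟩⟩
      intro b hb
      rcases List.mem_cons.1 hb with rfl | hb'
      · omega
      · have := h.1 b hb'; omega
    · have hd : decide (PySem.Str.len y < PySem.Str.len x) = false := decide_eq_false hc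
      simp only [PySem.List.insertBy, hd, Bool.false_eq_true, if_false]
      refine List.pairwise_cons.2 ⟨?_, ih h.2⟩
      intro b hb
      rcases (PySem.List.mem_insertBy (fun a b => decide (PySem.Str.len b < PySem.Str.len a)) x b ys).1 hb with rfl | hb'
      · omega
      · exact h.1 b hb'

-- first line-occurring element of the insertion result = one max-update step of A's loop
theorem pv_firstHit_insertBy (line : String) (x : String) (S : List String)
    (h : S.Pairwise (fun a b => PySem.Str.len b ≤ PySem.Str.len a)) :
    ((PySem.List.insertBy (fun a b => decide (PySem.Str.len b < PySem.Str.len a)) x S).find?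
        (fun r => PySem.Str.isIn r line)).getD "" =
      (if PySem.Str.isIn x line &&
          decide (PySem.Str.len (((S.find? (fun r => PySem.Str.isIn r line)).getD "")) < PySem.Str.len x) then x
        else (S.find? (fun r => PySem.Str.isIn r line)).getD "") := by
  induction S with
  | nil =>
    by_cases hp : PySem.Str.isIn x line = true
    · by_cases hl : PySem.Str.len "" < PySem.Str.len x
      · have hd : decide (PySem.Str.len "" < PySem.Str.len x) = true := decide_eq_true hl
        simp only [PySem.List.insertBy, List.find?_cons, List.find?_nil, hp, Option.getD_none,
          Option.getD_some]
        split_ifs with hif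
        · rfl
        · exact absurd hl (by simpa using hif)
      · have hx : x = "" := by
          refine pv_len_eq_zero x ?_
          have h0 : PySem.Str.len "" = 0 := rfl
          have := pv_len_nonneg x
          omega
        subst hx
        have hd : decide (PySem.Str.len "" < PySem.Str.len "") = false := decide_eq_false hl
        cases hIs : PySem.Str.isIn "" line with
        | true =>
          simp only [PySem.List.insertBy, List.find?_cons, List.find?_nil, hIs, Option.getD_none,
            Option.getD_some]
          split_ifs <;> rfl
        | false =>
          simp only [PySem.List.insertBy, List.find?_cons, List.find?_nil, hIs, Option.getD_none,
            Bool.false_and, Bool.false_eq_true, if_false]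
    · have hp' : PySem.Str.isIn x line = false := by simpa using hp
      simp only [PySem.List.insertBy, List.find?_cons, List.find?_nil, hp', Bool.false_and,
        Bool.false_eq_true, if_false, Option.getD_none]
  | cons y ys ih =>
    rw [List.pairwise_cons] at h
    by_cases hc : PySem.Str.len y < PySem.Str.len x
    · have hd : decide (PySem.Str.len y < PySem.Str.len x) = true := decide_eq_true hc
      by_cases hp : PySem.Str.isIn x line = true
      · -- every hit in y :: ys is strictly shorter than x
        have hFlt : PySem.Str.len (((y :: ys).find? (fun r => PySem.Str.isIn r line)).getD "") < PySem.Str.len x := by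
          cases hF : (y :: ys).find? (fun r => PySem.Str.isIn r line) with
          | none =>
            have h0 : PySem.Str.len "" = 0 := rfl
            have hy0 := pv_len_nonneg y
            simp only [Option.getD_none]
            omega
          | some F =>
            have hmem := List.mem_of_find?_eq_some hF
            rcases List.mem_cons.1 hmem with rfl | hmem'
            · simpa using hc
            · have := h.1 F hmem'
              simp only [Option.getD_some]
              omega
        have hd2 : decide (PySem.Str.len (((y :: ys).find? (fun r => PySem.Str.isIn r line)).getD "") < PySem.Str.len x) = true :=
          decide_eq_true hFlt
        simp only [PySem.List.insertBy, hd, if_true, List.find?_cons (a := x),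
          hp, hd2, Bool.and_self, Option.getD_some]
      · have hp' : PySem.Str.isIn x line = false := by simpa using hp
        simp only [PySem.List.insertBy, hd, if_true, List.find?_cons (a := x),
          hp', Bool.false_and, Bool.false_eq_true, if_false]
    · have hd : decide (PySem.Str.len y < PySem.Str.len x) = false := decide_eq_false hc
      by_cases hy : PySem.Str.isIn y line = true
      · simp only [PySem.List.insertBy, hd, Bool.false_eq_true, if_false, List.find?_cons (a := y),
          hy, Option.getD_some, Bool.and_false]
      · have hy' : PySem.Str.isIn y line = false := by simpa using hy
        simp only [PySem.List.insertBy, hd, Bool.false_eq_true, if_false, List.find?_cons (a := y),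
          hy']
        exact ih h.2

-- A's whole loop = first match of the stable length-descending sort, plus the sortedness invariant
theorem pv_fold_sorted (line : String) (xs : List String) :
    ((List.foldl (fun acc x => PySem.List.insertBy (fun a b => decide (PySem.Str.len b < PySem.Str.len a)) x acc) [] xs).Pairwise
        (fun a b => PySem.Str.len b ≤ PySem.Str.len a)) ∧
    ((List.foldl (fun acc x => PySem.List.insertBy (fun a b => decide (PySem.Str.len b < PySem.Str.len a)) x acc) [] xs).find?
        (fun r => PySem.Str.isIn r line)).getD "" =
      xs.foldl (fun longest r =>
        if PySem.Str.isIn r line && decide (PySem.Str.len longest < PySem.Str.len r) then r else longest) "" := by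
  induction xs using List.reverseRecOn with
  | nil => simp
  | append_singleton xs x ih =>
    rw [List.foldl_append, List.foldl_append]
    simp only [List.foldl_cons, List.foldl_nil]
    refine ⟨pv_insertBy_pairwise x _ ih.1, ?_⟩
    rw [pv_firstHit_insertBy line x _ ih.1, ih.2]

theorem pv_longest_eq (line : String) (replacements : List String) :
    replacements.foldl (fun longest r =>
        if PySem.Str.isIn r line && decide (PySem.Str.len longest < PySem.Str.len r) then r else longest) "" =
      ((PySem.List.sorted replacements (fun r => PySem.Str.len r) true).find?
        (fun r => PySem.Str.isIn r line)).getD "" := by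
  rw [PySem.List.sorted_rev_eq_foldl_insertBy]
  exact ((pv_fold_sorted line replacements).2).symm

-- ===== VERDICT (by name: the statement is the Claim_ definition above) =====
theorem replace_longest_substring_spec : Claim_equal_replace_longest_substring := by
  intro line replacements code _
  unfold Spec_replace_longest_substring replace_longest_substring replace_longest_substring_alt
    get_characters_surrounding_substring
  rw [pv_longest_eq line replacements]
  by_cases h : ((PySem.List.sorted replacements (fun r => PySem.Str.len r) true).find?
      (fun r => PySem.Str.isIn r line)).getD "" = ""
  · rw [if_neg (show ¬ ((PySem.List.sorted replacements (fun r => PySem.Str.len r) true).find?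
        (fun r => PySem.Str.isIn r line)).getD "" ≠ "" from fun hne => hne h), if_pos h]
  · rw [if_pos h, if_neg h]
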